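-- pv_equiv track=rewrite | github.com/chlo-gto91/Projet_MasterCamp | Graphe.py | segmenter_phrases
-- ===== SOURCE A (Python) =====
-- def segmenter_phrases(commentaire):
--     marqueurs = ['.', '!', '?']  # Liste des marqueurs de ponctuation
--     phrases = []
--     phrase = ""
--     for caractere in commentaire:
--         phrase += caractere
--         if caractere in marqueurs:
--             phrases.append(phrase.strip())  # Ajouter la phrase à la liste
--             phrase = ""
--     if phrase:
--         phrases.append(phrase.strip())  # Ajouter la dernière phrase si elle existe
--     return phrases
-- ===== SOURCE B (Python) =====
-- import re
--
-- def segmenter_phrases(commentaire):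
--     # One regex pass: a match is a run up to and including a terminator,
--     # or a trailing run without one; strip each match.
--     return [m.strip() for m in re.findall(r'[^.!?]*[.!?]|[^.!?]+', commentaire)]
-- ===== Notes on version B (the rewrite author's own statement) =====
-- stated objective: idiomatic
-- what changed: Replaces the char-by-char accumulator loop (append, test, flush on terminator, flush non-empty tail) with a single regex findall pass r'[^.!?]*[.!?]|[^.!?]+' whose matches are the segments, mapped through strip. (the C-level regex engine replaces per-character Python string concatenation).
import Mathlib
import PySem

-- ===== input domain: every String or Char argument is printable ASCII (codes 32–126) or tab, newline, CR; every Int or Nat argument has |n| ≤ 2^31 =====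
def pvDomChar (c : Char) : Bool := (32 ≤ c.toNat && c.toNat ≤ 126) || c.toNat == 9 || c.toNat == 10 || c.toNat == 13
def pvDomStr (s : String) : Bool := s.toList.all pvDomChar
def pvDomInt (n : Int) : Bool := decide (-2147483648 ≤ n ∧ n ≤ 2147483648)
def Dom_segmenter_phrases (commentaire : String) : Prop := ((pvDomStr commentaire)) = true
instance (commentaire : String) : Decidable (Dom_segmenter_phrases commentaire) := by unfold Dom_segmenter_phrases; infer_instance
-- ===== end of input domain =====

-- B replaces A's char-by-char accumulator loop with one regex-style segmentation pass
-- (findall of "run up to a terminator | trailing run") mapped through strip (objective: idiomatic).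


-- ===== PORT A =====
-- phrase.strip() (Python str.strip); the accumulator `phrase` is kept as a List Char
def pvStrip (cs : List Char) : String := PySem.Str.strip (String.mk cs)

-- the body of A's for-loop, over the state (phrases, phrase)
def pvStepA (st : List String × List Char) (caractere : Char) : List String × List Char :=
  let phrase := st.2 ++ [caractere]
  if caractere ∈ ['.', '!', '?'] then (st.1 ++ [pvStrip phrase], []) else (st.1, phrase)

def segmenter_phrases (commentaire : String) : List String :=
  let st := commentaire.toList.foldl pvStepA ([], [])
  if st.2 ≠ [] then st.1 ++ [pvStrip st.2] else st.1

-- ===== PORT B =====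
def pvIsMark (c : Char) : Bool := c == '.' || c == '!' || c == '?'

-- Hand port (exact) of re.findall(r'[^.!?]*[.!?]|[^.!?]+', s): on a nonempty remainder the
-- engine matches the maximal run of non-terminators plus the terminator if one follows
-- (first alternative), otherwise that trailing run (second alternative), then continues.
def pvFindallSeg : List Char → List (List Char)
  | [] => []
  | c :: cs =>
    let pre := (c :: cs).takeWhile (fun ch => !pvIsMark ch)
    match h : (c :: cs).drop pre.length with
    | [] => [pre]
    | m :: rest => (pre ++ [m]) :: pvFindallSeg rest
termination_by l => l.length
decreasing_by
  have := congrArg List.length h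
  rw [List.length_drop] at this
  simp only [List.length_cons] at this ⊢
  omega

def segmenter_phrases_alt (commentaire : String) : List String :=
  (pvFindallSeg commentaire.toList).map pvStrip

-- ===== PRECONDITION & SPEC =====
def Spec_segmenter_phrases (commentaire : String) (out : List String) : Prop := out = segmenter_phrases_alt commentaire
instance (commentaire : String) (out : List String) : Decidable (Spec_segmenter_phrases commentaire out) := by unfold Spec_segmenter_phrases; infer_instance

-- ===== CLAIM (what is proved, stated in full; the proofs are below) =====
def Claim_equal_segmenter_phrases : Prop := ∀ (commentaire : String), Dom_segmenter_phrases commentaire → Spec_segmenter_phrases commentaire (segmenter_phrases commentaire)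

-- ===== LEMMAS AND PROOFS =====

lemma mem_marks_iff (c : Char) : c ∈ ['.', '!', '?'] ↔ pvIsMark c = true := by
  simp [pvIsMark]; tauto

lemma takeWhile_all_append (p : Char → Bool) (acc : List Char) (c : Char) (cs : List Char)
    (h : ∀ x ∈ acc, p x = true) (hc : p c = false) :
    (acc ++ c :: cs).takeWhile p = acc := by
  induction acc with
  | nil => simp [hc]
  | cons a t ih =>
      have ha := h a (by simp)
      simp [ha]
      exact ih (fun x hx => h x (by simp [hx]))

-- pvFindallSeg on a block of non-terminators followed by a terminator
lemma seg_mark (acc : List Char) (c : Char) (cs : List Char)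
    (h : ∀ x ∈ acc, pvIsMark x = false) (hc : pvIsMark c = true) :
    pvFindallSeg (acc ++ c :: cs) = (acc ++ [c]) :: pvFindallSeg cs := by
  have htw : (acc ++ c :: cs).takeWhile (fun ch => !pvIsMark ch) = acc :=
    takeWhile_all_append _ _ _ _ (fun x hx => by simp [h x hx]) (by simp [hc])
  rw [pvFindallSeg.eq_def]
  split
  · next heq => simp at heq
  · next a t heq =>
      rw [heq] at htw
      have hdrop : (a :: t).drop acc.length = c :: cs := by rw [← heq]; simp
      dsimp only
      split
      · next heq2 =>
          rw [htw, hdrop] at heq2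
          simp at heq2
      · next m rest heq2 =>
          rw [htw, hdrop] at heq2
          injection heq2 with h1 h2
          subst h1; subst h2
          rw [htw]

-- pvFindallSeg on a nonempty terminator-free string
lemma seg_nomark (a : Char) (t : List Char) (h : ∀ x ∈ a :: t, pvIsMark x = false) :
    pvFindallSeg (a :: t) = [a :: t] := by
  have htw : (a :: t).takeWhile (fun ch => !pvIsMark ch) = a :: t := by
    rw [List.takeWhile_eq_self_iff]
    intro x hx; simp [h x hx]
  rw [pvFindallSeg.eq_def]
  split
  · next heq => simp at heq
  · next a' t' heq =>
      rw [heq] at htw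
      dsimp only
      split
      · next heq2 => rw [htw, ← heq]
      · next m rest heq2 =>
          rw [htw] at heq2
          simp at heq2

-- loop invariant: A's fold with pending phrase `acc` (terminator-free) and emitted `ps`
lemma loopA (cs : List Char) : ∀ (acc : List Char) (ps : List String),
    (∀ x ∈ acc, pvIsMark x = false) →
    (let st := cs.foldl pvStepA (ps, acc);
     if st.2 ≠ [] then st.1 ++ [pvStrip st.2] else st.1)
      = ps ++ (pvFindallSeg (acc ++ cs)).map pvStrip := by
  induction cs with
  | nil =>
      intro acc ps h
      rcases acc with _ | ⟨a, t⟩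
      · simp [pvFindallSeg.eq_def]
      · simp [seg_nomark a t h]
  | cons c cs ih =>
      intro acc ps h
      by_cases hm : pvIsMark c = true
      · have hstep : pvStepA (ps, acc) c = (ps ++ [pvStrip (acc ++ [c])], []) := by
          simp [pvStepA, (mem_marks_iff c).2 hm]
        simp only [List.foldl_cons, hstep]
        rw [ih [] (ps ++ [pvStrip (acc ++ [c])]) (by simp)]
        rw [seg_mark acc c cs h hm]
        simp
      · have hstep : pvStepA (ps, acc) c = (ps, acc ++ [c]) := by
          have : ¬ c ∈ ['.', '!', '?'] := fun hx => hm ((mem_marks_iff c).1 hx)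
          simp [pvStepA, this]
        simp only [List.foldl_cons, hstep]
        rw [ih (acc ++ [c]) ps (by intro x hx; rcases List.mem_append.1 hx with h1 | h1
                                   · exact h x h1
                                   · simp at h1; subst h1; simpa using hm)]
        simp

-- ===== VERDICT (by name: the statement is the Claim_ definition above) =====
theorem segmenter_phrases_spec : Claim_equal_segmenter_phrases := by
  intro commentaire _
  unfold Spec_segmenter_phrases segmenter_phrases segmenter_phrases_alt
  simpa using loopA commentaire.toList [] [] (by simp)
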